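-- pv_equiv track=rewrite | github.com/sjogleka/General_codes | smallestNegativeBalance.py | smallest_negative_balance
-- ===== SOURCE A (Python) =====
-- def smallest_negative_balance(balances):
--     people = set()
--     for record in balances:
--         people.add(record[0])
--         people.add(record[1])
--
--     balance = {person: 0 for person in people}
--     for record in balances:
--         balance[record[0]] -= record[2]
--         balance[record[1]] += record[2]
--     ret = []
--     smallest_balance = float('inf')
--     for person, bal in balance.items():
--         smallest_balance = min(smallest_balance, bal)
--
--     if smallest_balance >= 0:
--         return ["Nobody has a negative balance"]
--
--     for person, bal in balance.items():
--         if bal == smallest_balance: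
--             ret.append(person)
--     ret.sort()
--     return ret
-- ===== SOURCE B (Python) =====
-- def smallest_negative_balance(balances):
--     events = []
--     for payer, payee, amount in balances:
--         events.append((payer, -amount))
--         events.append((payee, amount))
--     events.sort(key=lambda e: e[0])
--     best = None
--     winners = []
--     i, n = 0, len(events)
--     while i < n:
--         person = events[i][0]
--         total = 0
--         while i < n and events[i][0] == person:
--             total += events[i][1]
--             i += 1
--         if best is None or total < best:
--             best, winners = total, [person]
--         elif total == best:
--             winners.append(person)
--     if best is None or best >= 0:
--         return ["Nobody has a negative balance"]
--     return winners
-- ===== Notes on version B (the rewrite author's own statement) =====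
-- stated objective: alternative
-- what changed: B drops the people-set and balance-dict entirely: it explodes each record into two (person, delta) events, sorts the events by name, and a single while-loop over the sorted runs sums each person's net and keeps a running minimum with its holders, which emerge already name-sorted so no dict lookup and no final sort are needed.
import Mathlib
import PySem

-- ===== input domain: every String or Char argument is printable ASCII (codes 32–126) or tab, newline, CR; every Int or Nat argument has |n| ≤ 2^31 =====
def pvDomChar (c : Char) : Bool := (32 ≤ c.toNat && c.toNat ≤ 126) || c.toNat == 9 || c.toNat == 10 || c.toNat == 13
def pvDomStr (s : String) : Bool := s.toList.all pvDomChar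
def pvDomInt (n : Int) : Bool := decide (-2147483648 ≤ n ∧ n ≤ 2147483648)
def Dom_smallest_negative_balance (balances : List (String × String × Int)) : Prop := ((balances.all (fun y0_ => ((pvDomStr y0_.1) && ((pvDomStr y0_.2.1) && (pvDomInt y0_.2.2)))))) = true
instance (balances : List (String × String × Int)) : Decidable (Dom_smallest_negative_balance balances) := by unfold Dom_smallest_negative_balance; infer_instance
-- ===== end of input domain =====

-- B replaces A's hash-dict accumulation by sort-and-group-by: two (person, delta) events per
-- record, sorted by name, then one scan over the runs keeps the running minimum and its holders
-- (already name-sorted, so no dict and no final sort). Python A iterates a set/dict in hash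
-- order; the returned value is order-independent (a minimum / a sorted list).

-- ===== PORT A =====
-- people = set(); for record: people.add(record[0]); people.add(record[1])
def a_people (balances : List (String × String × Int)) : PySem.Set String :=
  balances.foldl (fun s r => PySem.Set.add (PySem.Set.add s r.1) r.2.1) PySem.Set.empty

-- balance = {person: 0 for person in people}
def a_init (balances : List (String × String × Int)) : PySem.Dict String Int :=
  (a_people balances).foldl (fun d p => d.insert p 0) PySem.Dict.empty

-- for record: balance[record[0]] -= record[2]; balance[record[1]] += record[2]  (keys always present)
def a_balance (balances : List (String × String × Int)) : PySem.Dict String Int :=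
  balances.foldl
    (fun d r => (d.modify r.1 0 (fun x => x - r.2.2)).modify r.2.1 0 (fun x => x + r.2.2))
    (a_init balances)

-- smallest_balance = float('inf'); for _, bal in balance.items(): smallest_balance = min(smallest_balance, bal)
-- (none models float('inf'): the value before any item is seen)
def a_smallest (balances : List (String × String × Int)) : Option Int :=
  (a_balance balances).items.foldl
    (fun m pb => match m with | none => some pb.2 | some mv => some (min mv pb.2)) none

def smallest_negative_balance (balances : List (String × String × Int)) : List String :=
  match a_smallest balances with
  | none => ["Nobody has a negative balance"]
  | some mv =>
    if mv ≥ 0 then ["Nobody has a negative balance"]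
    else
      PySem.List.sorted
        ((a_balance balances).items.foldl
          (fun ret pb => if pb.2 = mv then ret ++ [pb.1] else ret) ([] : List String))
        (fun x => x) false

-- ===== PORT B =====
-- events = []; for payer, payee, amount: events.append((payer, -amount)); events.append((payee, amount))
def b_events (balances : List (String × String × Int)) : List (String × Int) :=
  balances.foldl (fun es r => es ++ [(r.1, -r.2.2), (r.2.1, r.2.2)]) []

-- the outer while loop: consume one maximal run of events with the same name (the inner while),
-- sum its deltas, update best/winners, continue after the run
def b_loop : List (String × Int) → Option Int × List String → Option Int × List String
  | [], st => st
  | (p, v) :: t, st =>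
    let total := (((p, v) :: t).takeWhile (fun e => e.1 == p)).foldl (fun a e => a + e.2) 0
    b_loop (((p, v) :: t).dropWhile (fun e => e.1 == p))
      (match st.1 with
       | none => (some total, [p])
       | some m =>
         if total < m then (some total, [p])
         else if total = m then (some m, st.2 ++ [p])
         else st)
  termination_by evs _ => evs.length
  decreasing_by
    simp only [List.dropWhile_cons, beq_self_eq_true, if_true, List.length_cons]
    exact Nat.lt_succ_of_le (List.length_dropWhile_le _ _)

-- events.sort(key=lambda e: e[0]); the while loop; then the sentinel test
def smallest_negative_balance_alt (balances : List (String × String × Int)) : List String :=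
  let st := b_loop (PySem.List.sorted (b_events balances) (fun e => e.1) false) (none, [])
  match st.1 with
  | none => ["Nobody has a negative balance"]
  | some m =>
    if m ≥ 0 then ["Nobody has a negative balance"] else st.2

-- ===== PRECONDITION & SPEC =====
def Spec_smallest_negative_balance (balances : List (String × String × Int)) (out : List String) : Prop := out = smallest_negative_balance_alt balances
instance (balances : List (String × String × Int)) (out : List String) : Decidable (Spec_smallest_negative_balance balances out) := by unfold Spec_smallest_negative_balance; infer_instance

-- ===== CLAIM (what is proved, stated in full; the proofs are below) =====
def Claim_equal_smallest_negative_balance : Prop := ∀ (balances : List (String × String × Int)), Dom_smallest_negative_balance balances → Spec_smallest_negative_balance balances (smallest_negative_balance balances)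


-- ===== LEMMAS AND PROOFS =====

-- shared abbreviations
def pvUpd (d : PySem.Dict String Int) (r : String × String × Int) : PySem.Dict String Int :=
  (d.modify r.1 0 (fun x => x - r.2.2)).modify r.2.1 0 (fun x => x + r.2.2)

def pvPairs (l : List (String × String × Int)) : List String := l.flatMap (fun r => [r.1, r.2.1])

def pvNet (p : String) (l : List (String × String × Int)) : Int :=
  (l.map (fun r => (if r.2.1 = p then r.2.2 else 0) - (if r.1 = p then r.2.2 else 0))).sum

def pvMin (m : Int) (its : List (String × Int)) : Int := its.foldl (fun a pb => min a pb.2) m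

def pvMinStep (m : Option Int) (pb : String × Int) : Option Int :=
  match m with | none => some pb.2 | some mv => some (min mv pb.2)

def pvStep (st : Option Int × List String) (pb : String × Int) : Option Int × List String :=
  match st.1 with
  | none => (some pb.2, [pb.1])
  | some m =>
    if pb.2 < m then (some pb.2, [pb.1])
    else if pb.2 = m then (st.1, st.2 ++ [pb.1])
    else st

-- ---------- A side ----------

lemma a_balance_eq_fold (l : List (String × String × Int)) :
    a_balance l = l.foldl pvUpd (a_init l) := rfl

lemma a_smallest_eq (l : List (String × String × Int)) :
    a_smallest l = (a_balance l).items.foldl pvMinStep none := rfl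

lemma getD_pvUpd (d : PySem.Dict String Int) (r : String × String × Int) (p : String) :
    (pvUpd d r).getD p 0 =
      d.getD p 0 + ((if r.2.1 = p then r.2.2 else 0) - (if r.1 = p then r.2.2 else 0)) := by
  obtain ⟨a, b, v⟩ := r
  simp only [pvUpd, PySem.Dict.getD_modify]
  by_cases hpb : p = b
  · subst hpb
    rw [if_pos rfl]
    by_cases hpa : p = a
    · subst hpa
      simp only [if_true]
      ring
    · rw [if_neg hpa, if_pos rfl, if_neg (fun hh : a = p => hpa hh.symm)]
      ring
  · rw [if_neg hpb]
    by_cases hpa : p = a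
    · subst hpa
      rw [if_pos rfl, if_neg (fun hh : b = p => hpb hh.symm), if_pos rfl]
      ring
    · rw [if_neg hpa, if_neg (fun hh : b = p => hpb hh.symm), if_neg (fun hh : a = p => hpa hh.symm)]
      ring

lemma getD_fold (l : List (String × String × Int)) :
    ∀ (d : PySem.Dict String Int) (p : String),
      (l.foldl pvUpd d).getD p 0 = d.getD p 0 + pvNet p l := by
  induction l with
  | nil => intro d p; simp [pvNet]
  | cons r t ih =>
    intro d p
    simp only [List.foldl_cons, ih, getD_pvUpd, pvNet, List.map_cons, List.sum_cons]
    ring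

lemma keys_modify_add (d : PySem.Dict String Int) (k : String) (d0 : Int) (f : Int → Int) :
    (d.modify k d0 f).keys = PySem.Set.add d.keys k := by
  rw [PySem.Dict.keys_modify]
  by_cases h : d.contains k = true
  · rw [PySem.Dict.keys_insert_of_contains _ _ h,
      PySem.Set.add_of_mem ((PySem.Dict.contains_iff_mem_keys _ _).mp h)]
  · have h' : d.contains k = false := by simpa using h
    rw [PySem.Dict.keys_insert_of_not_contains _ _ h',
      PySem.Set.add_of_not_mem]
    intro hm
    exact h ((PySem.Dict.contains_iff_mem_keys _ _).mpr hm)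

lemma keys_pvUpd (d : PySem.Dict String Int) (r : String × String × Int) :
    (pvUpd d r).keys = PySem.Set.add (PySem.Set.add d.keys r.1) r.2.1 := by
  unfold pvUpd
  rw [keys_modify_add, keys_modify_add]

lemma keys_fold (l : List (String × String × Int)) :
    ∀ d : PySem.Dict String Int,
      (l.foldl pvUpd d).keys = PySem.Set.update d.keys (pvPairs l) := by
  induction l with
  | nil => intro d; simp [pvPairs, PySem.Set.update_nil]
  | cons r t ih =>
    intro d
    simp only [List.foldl_cons, ih, keys_pvUpd, pvPairs, List.flatMap_cons,
      List.cons_append, List.nil_append, PySem.Set.update_cons]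

lemma people_fold (l : List (String × String × Int)) :
    ∀ s : PySem.Set String,
      l.foldl (fun s r => PySem.Set.add (PySem.Set.add s r.1) r.2.1) s
        = PySem.Set.update s (pvPairs l) := by
  induction l with
  | nil => intro s; simp [pvPairs, PySem.Set.update_nil]
  | cons r t ih =>
    intro s
    simp only [List.foldl_cons, ih, pvPairs, List.flatMap_cons, List.cons_append,
      List.nil_append, PySem.Set.update_cons]

lemma a_people_eq (l : List (String × String × Int)) :
    a_people l = PySem.Set.ofList (pvPairs l) := by
  rw [a_people, people_fold]
  exact PySem.Set.update_nil_left _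

lemma nodup_a_people (l : List (String × String × Int)) : (a_people l).Nodup := by
  rw [a_people_eq]; exact PySem.Set.nodup_ofList _

lemma keys_a_init (l : List (String × String × Int)) :
    (a_init l).keys = a_people l := by
  rw [a_init, PySem.Dict.keys_foldl_insert, PySem.Dict.keys_empty,
    PySem.Set.update_nil_left, PySem.Set.ofList_eq_self_of_nodup _ (nodup_a_people l)]

lemma getD_insert_zero_fold (ps : List String) :
    ∀ d : PySem.Dict String Int, (∀ q, d.getD q 0 = 0) → ∀ p,
      (ps.foldl (fun d q => d.insert q (0 : Int)) d).getD p 0 = 0 := by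
  induction ps with
  | nil => intro d h p; exact h p
  | cons q t ih =>
    intro d h p
    refine ih _ (fun q' => ?_) p
    rw [PySem.Dict.getD_insert]
    split_ifs with hq
    · rfl
    · exact h q'

lemma getD_a_init (l : List (String × String × Int)) (p : String) :
    (a_init l).getD p 0 = 0 :=
  getD_insert_zero_fold _ _ (fun q => by simp [PySem.Dict.getD_empty]) p

lemma filter_not_contains_ofList (xs : List String) :
    (PySem.Set.ofList xs).filter (fun y => !(PySem.Set.contains (PySem.Set.ofList xs) y)) = [] := by
  rw [List.filter_eq_nil_iff]
  intro y hy
  simp only [PySem.Set.contains_eq_listContains, Bool.not_eq_true', Bool.not_eq_false]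
  exact List.elem_eq_true_of_mem hy

lemma keys_a_balance (l : List (String × String × Int)) :
    (a_balance l).keys = a_people l := by
  rw [a_balance_eq_fold, keys_fold, keys_a_init, a_people_eq,
    PySem.Set.update_eq_append_filter, filter_not_contains_ofList, List.append_nil]

lemma getD_a_balance (l : List (String × String × Int)) (p : String) :
    (a_balance l).getD p 0 = pvNet p l := by
  rw [a_balance_eq_fold, getD_fold, getD_a_init, zero_add]

lemma items_a_balance (l : List (String × String × Int)) :
    (a_balance l).items = (a_people l).map (fun k => (k, pvNet k l)) := by
  rw [PySem.Dict.items_eq_map_keys _ (by rw [keys_a_balance]; exact nodup_a_people l) (0 : Int),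
    keys_a_balance]
  exact List.map_congr_left (fun k _ => by rw [getD_a_balance])

-- running minimum (A's min-fold)
lemma foldl_min_some (its : List (String × Int)) :
    ∀ m : Int, its.foldl pvMinStep (some m) = some (pvMin m its) := by
  induction its with
  | nil => intro m; rfl
  | cons pb t ih => intro m; exact ih (min m pb.2)

lemma pvMin_eq_foldl_map (its : List (String × Int)) (m : Int) :
    pvMin m its = (its.map Prod.snd).foldl min m := by
  rw [pvMin, List.foldl_map]

-- minimum of a nonempty list is invariant under permutation
lemma foldl_min_le_init (l : List Int) : ∀ a : Int, l.foldl min a ≤ a := by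
  induction l with
  | nil => intro a; exact le_refl a
  | cons x t ih => intro a; exact le_trans (ih (min a x)) (min_le_left _ _)

lemma foldl_min_le_mem (l : List Int) : ∀ (a b : Int), b ∈ l → l.foldl min a ≤ b := by
  induction l with
  | nil => intro a b hb; cases hb
  | cons x t ih =>
    intro a b hb
    rcases List.mem_cons.mp hb with h | h
    · subst h
      exact le_trans (foldl_min_le_init t (min a b)) (min_le_right _ _)
    · exact ih (min a x) b h

lemma foldl_min_mem (l : List Int) : ∀ a : Int, l.foldl min a = a ∨ l.foldl min a ∈ l := by
  induction l with
  | nil => intro a; exact Or.inl rfl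
  | cons x t ih =>
    intro a
    rw [List.foldl_cons]
    rcases ih (min a x) with h | h
    · rw [h]
      rcases min_cases a x with ⟨he, _⟩ | ⟨he, _⟩
      · exact Or.inl he
      · exact Or.inr (by rw [he]; exact List.mem_cons_self)
    · exact Or.inr (List.mem_cons_of_mem _ h)

lemma foldl_min_perm {l1 l2 : List Int} (h : l1.Perm l2) (a : Int) :
    l1.foldl min a = l2.foldl min a :=
  @List.Perm.foldl_eq _ _ min _ _ ⟨fun a b c => min_right_comm a b c⟩ h a

lemma minHead_perm (x y : Int) (xs ys : List Int) (h : (x :: xs).Perm (y :: ys)) :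
    xs.foldl min x = ys.foldl min y := by
  have hx : xs.foldl min x = (x :: xs).foldl min x := by
    rw [List.foldl_cons, min_self]
  have hy : ys.foldl min y = (y :: ys).foldl min y := by
    rw [List.foldl_cons, min_self]
  have hxm : x ∈ y :: ys := h.mem_iff.mp (List.mem_cons_self)
  have hym : y ∈ y :: ys := List.mem_cons_self
  rw [hx, hy, foldl_min_perm h x]
  apply le_antisymm
  · rcases foldl_min_mem (y :: ys) y with h2 | h2
    · rw [h2]; exact foldl_min_le_mem _ x y hym
    · exact foldl_min_le_mem _ x _ h2
  · rcases foldl_min_mem (y :: ys) x with h2 | h2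
    · rw [h2]; exact foldl_min_le_mem _ y x hxm
    · exact foldl_min_le_mem _ y _ h2

-- B's running-minimum-with-reset fold, characterised (minimum + holders in scan order)
lemma scan_some (its : List (String × Int)) :
    ∀ (m : Int) (w : List String),
      its.foldl pvStep (some m, w)
      = (some (pvMin m its),
         (if pvMin m its = m then w else [])
           ++ (its.filter (fun pb => decide (pb.2 = pvMin m its))).map Prod.fst) := by
  induction its with
  | nil => intro m w; simp [pvMin]
  | cons pb t ih =>
    intro m w
    rw [List.foldl_cons]
    by_cases h1 : pb.2 < m
    · have hs : pvStep (some m, w) pb = (some pb.2, [pb.1]) := by simp [pvStep, h1]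
      rw [hs, ih pb.2 [pb.1]]
      have hm : pvMin m (pb :: t) = pvMin pb.2 t := by
        show pvMin (min m pb.2) t = _
        rw [min_eq_right (le_of_lt h1)]
      rw [hm]
      have hne : pvMin pb.2 t ≠ m := ne_of_lt (lt_of_le_of_lt (by
        rw [pvMin_eq_foldl_map]; exact foldl_min_le_init _ _) h1)
      rw [if_neg hne, List.filter_cons]
      by_cases h2 : pb.2 = pvMin pb.2 t
      · simp [← h2]
      · simp [h2, Ne.symm h2]
    · by_cases h2 : pb.2 = m
      · have hs : pvStep (some m, w) pb = (some m, w ++ [pb.1]) := by simp [pvStep, h2]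
        rw [hs, ih m (w ++ [pb.1])]
        have hm : pvMin m (pb :: t) = pvMin m t := by
          show pvMin (min m pb.2) t = _
          rw [h2, min_self]
        rw [hm, List.filter_cons]
        by_cases h3 : pvMin m t = m
        · have hd : pb.2 = pvMin m t := h2.trans h3.symm
          simp [h3, hd, List.append_assoc]
        · have hd : ¬ pb.2 = pvMin m t := by rw [h2]; exact fun hh => h3 hh.symm
          simp [h3, hd]
      · have hgt : m < pb.2 := lt_of_le_of_ne (le_of_not_gt h1) (fun hh => h2 hh.symm)
        have hs : pvStep (some m, w) pb = (some m, w) := by simp [pvStep, h1, h2]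
        rw [hs, ih m w]
        have hm : pvMin m (pb :: t) = pvMin m t := by
          show pvMin (min m pb.2) t = _
          rw [min_eq_left (le_of_lt hgt)]
        have hne : pb.2 ≠ pvMin m t := ne_of_gt (lt_of_le_of_lt (by
          rw [pvMin_eq_foldl_map]; exact foldl_min_le_init _ _) hgt)
        rw [hm, List.filter_cons]
        simp [hne]

-- ---------- B side ----------

lemma b_events_eq (l : List (String × String × Int)) :
    b_events l = l.flatMap (fun r => [(r.1, -r.2.2), (r.2.1, r.2.2)]) := by
  rw [b_events, PySem.List.foldl_append_eq_flatMap, List.nil_append]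

lemma map_fst_events (l : List (String × String × Int)) :
    (b_events l).map Prod.fst = pvPairs l := by
  rw [b_events_eq, pvPairs, List.map_flatMap]
  simp

-- the group list of an event list (mirrors b_loop's run decomposition)
def pvGroups : List (String × Int) → List (String × Int)
  | [] => []
  | (p, v) :: t =>
    (p, (((p, v) :: t).takeWhile (fun e => e.1 == p)).foldl (fun a e => a + e.2) 0)
      :: pvGroups (((p, v) :: t).dropWhile (fun e => e.1 == p))
  termination_by evs => evs.length
  decreasing_by
    simp only [List.dropWhile_cons, beq_self_eq_true, if_true, List.length_cons]
    exact Nat.lt_succ_of_le (List.length_dropWhile_le _ _)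

lemma b_loop_cons (p : String) (v : Int) (t : List (String × Int)) (st : Option Int × List String) :
    b_loop ((p, v) :: t) st
      = b_loop (((p, v) :: t).dropWhile (fun e => e.1 == p))
          (pvStep st (p, (((p, v) :: t).takeWhile (fun e => e.1 == p)).foldl (fun a e => a + e.2) 0)) := by
  obtain ⟨b, w⟩ := st
  simp only [b_loop]
  cases b with
  | none => rfl
  | some m => rfl

-- sum of the deltas carried by one person
def pvSumF (p : String) (evs : List (String × Int)) : Int :=
  ((evs.filter (fun e => e.1 == p)).map Prod.snd).sum

lemma pvSumF_events (p : String) (l : List (String × String × Int)) :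
    pvSumF p (b_events l) = pvNet p l := by
  rw [b_events_eq]
  induction l with
  | nil => simp [pvSumF, pvNet]
  | cons r t ih =>
    simp only [pvSumF, pvNet, List.flatMap_cons, List.filter_append, List.map_append,
      List.sum_append, List.map_cons, List.sum_cons] at ih ⊢
    rw [ih]
    have : (([(r.1, -r.2.2), (r.2.1, r.2.2)].filter (fun e => e.1 == p)).map Prod.snd).sum
        = (if r.2.1 = p then r.2.2 else 0) - (if r.1 = p then r.2.2 else 0) := by
      simp only [List.filter_cons, List.filter_nil, beq_iff_eq]
      by_cases h1 : r.1 = p <;> by_cases h2 : r.2.1 = p <;> simp [h1, h2]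
    rw [this]

lemma pvSumF_perm (p : String) {evs evs' : List (String × Int)} (h : evs.Perm evs') :
    pvSumF p evs = pvSumF p evs' :=
  ((h.filter _).map Prod.snd).sum_eq

-- in a list sorted by name, the head's run is exactly its filter
lemma run_split (p : String) :
    ∀ (evs : List (String × Int)), evs.Pairwise (fun a b => a.1 ≤ b.1) →
      (∀ e ∈ evs, p ≤ e.1) →
      evs.takeWhile (fun e => e.1 == p) = evs.filter (fun e => e.1 == p) ∧
      evs.dropWhile (fun e => e.1 == p) = evs.filter (fun e => !(e.1 == p)) := by
  intro evs
  induction evs with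
  | nil => intro _ _; exact ⟨rfl, rfl⟩
  | cons e t ih =>
    intro hpw hall
    have hpt : ∀ b ∈ t, e.1 ≤ b.1 := (List.pairwise_cons.mp hpw).1
    have hpw' : t.Pairwise (fun a b => a.1 ≤ b.1) := (List.pairwise_cons.mp hpw).2
    by_cases he : e.1 = p
    · have hb : (e.1 == p) = true := by simp [he]
      have ht := ih hpw' (fun b hb' => hall b (List.mem_cons_of_mem _ hb'))
      constructor
      · rw [List.takeWhile_cons, if_pos hb, List.filter_cons, if_pos hb, ht.1]
      · rw [List.dropWhile_cons, if_pos hb, List.filter_cons]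
        simp only [hb, Bool.not_true, if_neg (by simp : ¬ (false = true))]
        exact ht.2
    · have hlt : p < e.1 := lt_of_le_of_ne (hall e (List.mem_cons_self)) (fun hh => he hh.symm)
      have hnone : ∀ b ∈ e :: t, ¬ (b.1 == p) = true := by
        intro b hbm
        rcases List.mem_cons.mp hbm with h | h
        · subst h; simp [he]
        · have : p < b.1 := lt_of_lt_of_le hlt (hpt b h)
          simp [ne_of_gt this]
      have hb : (e.1 == p) = false := by simpa using hnone e (List.mem_cons_self)
      constructor
      · rw [List.takeWhile_cons, if_neg (by simp [hb])]
        exact (List.filter_eq_nil_iff.mpr hnone).symm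
      · rw [List.dropWhile_cons, if_neg (by simp [hb])]
        symm
        rw [List.filter_eq_self]
        intro b hbm
        simpa using hnone b hbm

-- the group loop is a pvStep-fold over the group list
lemma b_loop_eq_foldl : ∀ (n : ℕ) (evs : List (String × Int)), evs.length ≤ n →
    ∀ st, b_loop evs st = (pvGroups evs).foldl pvStep st := by
  intro n
  induction n with
  | zero =>
    intro evs h st
    cases evs with
    | nil => simp [b_loop, pvGroups]
    | cons e t => simp at h
  | succ n ih =>
    intro evs h st
    cases evs with
    | nil => simp [b_loop, pvGroups]
    | cons e t =>
      obtain ⟨p, v⟩ := e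
      have hlen : (((p, v) :: t).dropWhile (fun e => e.1 == p)).length ≤ n := by
        rw [List.dropWhile_cons_of_pos (by simp)]
        exact le_trans (List.length_dropWhile_le _ _) (by simpa using Nat.le_of_succ_le_succ h)
      rw [b_loop_cons, ih _ hlen]
      conv_rhs => rw [pvGroups]
      rw [List.foldl_cons]

-- what the group list of a name-sorted event list is
lemma groups_spec : ∀ (n : ℕ) (evs : List (String × Int)), evs.length ≤ n →
    evs.Pairwise (fun a b => a.1 ≤ b.1) →
    ((pvGroups evs).map Prod.fst).Pairwise (· < ·) ∧
    (∀ x, x ∈ (pvGroups evs).map Prod.fst ↔ x ∈ evs.map Prod.fst) ∧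
    (∀ pr ∈ pvGroups evs, pr.2 = pvSumF pr.1 evs) := by
  intro n
  induction n with
  | zero =>
    intro evs h _
    cases evs with
    | nil => refine ⟨by simp [pvGroups], fun x => by simp [pvGroups], fun pr hpr => by simp [pvGroups] at hpr⟩
    | cons e t => simp at h
  | succ n ih =>
    intro evs h hpw
    cases evs with
    | nil => refine ⟨by simp [pvGroups], fun x => by simp [pvGroups], fun pr hpr => by simp [pvGroups] at hpr⟩
    | cons e t =>
      obtain ⟨p, v⟩ := e
      have hall : ∀ e' ∈ (p, v) :: t, p ≤ e'.1 := by
        intro e' he'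
        rcases List.mem_cons.mp he' with hh | hh
        · subst hh; exact le_refl _
        · exact (List.pairwise_cons.mp hpw).1 e' hh
      obtain ⟨htw, hdw⟩ := run_split p ((p, v) :: t) hpw hall
      have hrest_pw : (((p, v) :: t).filter (fun e => !(e.1 == p))).Pairwise (fun a b => a.1 ≤ b.1) :=
        List.Pairwise.filter _ hpw
      have hrest_len : (((p, v) :: t).filter (fun e => !(e.1 == p))).length ≤ n := by
        rw [← hdw, List.dropWhile_cons_of_pos (by simp)]
        exact le_trans (List.length_dropWhile_le _ _) (by simpa using Nat.le_of_succ_le_succ h)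
      obtain ⟨ih1, ih2, ih3⟩ := ih _ hrest_len hrest_pw
      have hGr : pvGroups ((p, v) :: t)
          = (p, pvSumF p ((p, v) :: t)) :: pvGroups (((p, v) :: t).filter (fun e => !(e.1 == p))) := by
        conv_lhs => rw [pvGroups]
        rw [htw, hdw, PySem.List.foldl_add, zero_add]
        rfl
      have hmem_rest : ∀ x, x ∈ (((p, v) :: t).filter (fun e => !(e.1 == p))).map Prod.fst
          ↔ (x ∈ ((p, v) :: t).map Prod.fst ∧ x ≠ p) := by
        intro x
        constructor
        · rintro hx
          obtain ⟨e', he', rfl⟩ := List.mem_map.mp hx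
          have := List.mem_filter.mp he'
          exact ⟨List.mem_map.mpr ⟨e', this.1, rfl⟩, by simpa using this.2⟩
        · rintro ⟨hx, hne⟩
          obtain ⟨e', he', rfl⟩ := List.mem_map.mp hx
          exact List.mem_map.mpr ⟨e', List.mem_filter.mpr ⟨he', by simpa using hne⟩, rfl⟩
      refine ⟨?_, ?_, ?_⟩
      · rw [hGr, List.map_cons]
        refine List.pairwise_cons.mpr ⟨?_, ih1⟩
        intro q hq
        have hq' := (hmem_rest q).mp ((ih2 q).mp hq)
        obtain ⟨e', he', rfl⟩ := List.mem_map.mp hq'.1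
        exact lt_of_le_of_ne (hall e' he') (fun hh => hq'.2 hh.symm)
      · intro x
        rw [hGr, List.map_cons, List.mem_cons, ih2, hmem_rest x]
        by_cases hx : x = p
        · subst hx
          simp
        · simp [hx]
      · intro pr hpr
        rw [hGr] at hpr
        rcases List.mem_cons.mp hpr with hh | hh
        · subst hh; rfl
        · rw [ih3 pr hh]
          have hne : pr.1 ≠ p := by
            have : pr.1 ∈ (pvGroups (((p, v) :: t).filter (fun e => !(e.1 == p)))).map Prod.fst :=
              List.mem_map.mpr ⟨pr, hh, rfl⟩
            exact ((hmem_rest pr.1).mp ((ih2 pr.1).mp this)).2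
          unfold pvSumF
          rw [List.filter_filter]
          exact congrArg _ (congrArg _ (List.filter_congr (fun e _ => by
            by_cases he : e.1 = pr.1
            · simp [he, hne]
            · simp [he])))

-- the group list as a map over its (distinct, increasing) names
lemma groups_decomp (evs : List (String × Int)) (h3 : ∀ pr ∈ pvGroups evs, pr.2 = pvSumF pr.1 evs) :
    pvGroups evs = ((pvGroups evs).map Prod.fst).map (fun q => (q, pvSumF q evs)) := by
  rw [List.map_map]
  conv_lhs => rw [← List.map_id (pvGroups evs)]
  apply List.map_congr_left
  intro pr hpr
  have := h3 pr hpr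
  simp only [id, Function.comp]
  exact Prod.ext rfl this

-- ===== VERDICT =====
theorem smallest_negative_balance_spec : Claim_equal_smallest_negative_balance := by
  intro balances _
  show smallest_negative_balance balances = smallest_negative_balance_alt balances
  cases balances with
  | nil =>
    have hit : (a_balance []).items = [] := by
      rw [items_a_balance, a_people_eq]
      rfl
    have hsm : a_smallest [] = none := by
      rw [a_smallest_eq, hit]
      rfl
    have hb0 : PySem.List.sorted (b_events []) (fun e => e.1) false = [] := by
      rw [PySem.List.sorted_eq_nil_iff]
      rfl
    simp only [smallest_negative_balance, smallest_negative_balance_alt, hsm, hb0]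
    rw [b_loop_eq_foldl 0 [] (le_refl _)]
    simp [pvGroups]
  | cons r rs =>
    set l := r :: rs with hl
    -- names of both sides
    set netf : String → Int := fun k => pvNet k l with hnetf
    -- A side: items of the balance dict
    have hitems : (a_balance l).items = (a_people l).map (fun k => (k, netf k)) := items_a_balance l
    have hmem_people : ∀ x, x ∈ a_people l ↔ x ∈ pvPairs l := by
      intro x; rw [a_people_eq]; exact PySem.Set.mem_ofList _ _
    have hr1 : r.1 ∈ pvPairs l := by simp [pvPairs, hl]
    -- B side: sorted events and their groups
    set evs := PySem.List.sorted (b_events l) (fun e => e.1) false with hevs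
    have hperm_evs : evs.Perm (b_events l) := PySem.List.sorted_perm _ _ _
    have hpw : evs.Pairwise (fun a b => a.1 ≤ b.1) := PySem.List.sorted_pairwise _ _
    obtain ⟨hg1, hg2, hg3⟩ := groups_spec evs.length evs (le_refl _) hpw
    set D := (pvGroups evs).map Prod.fst with hD
    have hsum : ∀ q, pvSumF q evs = netf q := by
      intro q
      rw [pvSumF_perm q hperm_evs, pvSumF_events]
    have hGdec : pvGroups evs = D.map (fun q => (q, netf q)) := by
      rw [groups_decomp evs hg3, ← hD]
      exact List.map_congr_left (fun q _ => by rw [hsum q])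
    -- D is a permutation of the people list
    have hmemD : ∀ x, x ∈ D ↔ x ∈ a_people l := by
      intro x
      rw [hD, hg2 x, hmem_people]
      constructor
      · intro hx
        have := (hperm_evs.map Prod.fst).mem_iff.mp hx
        rwa [map_fst_events] at this
      · intro hx
        apply (hperm_evs.map Prod.fst).mem_iff.mpr
        rwa [map_fst_events]
    have hnodupD : D.Nodup := List.Pairwise.imp ne_of_lt hg1
    have hpermD : (a_people l).Perm D :=
      (List.perm_ext_iff_of_nodup (nodup_a_people l) hnodupD).mpr
        (fun x => ((hmemD x).symm))
    -- both sides are nonempty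
    have hr1D : r.1 ∈ D := (hmemD r.1).mpr ((hmem_people r.1).mpr hr1)
    -- destructure the people list and D
    cases hpl : a_people l with
    | nil =>
      rw [hpl] at hmem_people
      exact absurd ((hmem_people r.1).mpr hr1) (by simp)
    | cons k0 ks =>
      cases hDl : D with
      | nil => rw [hDl] at hr1D; cases hr1D
      | cons q0 qs =>
        -- A's minimum
        have hA : a_smallest l = some (pvMin (netf k0) (ks.map (fun k => (k, netf k)))) := by
          rw [a_smallest_eq, hitems, hpl, List.map_cons, List.foldl_cons]
          exact foldl_min_some _ _
        -- B's fold
        have hB : b_loop evs (none, [])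
            = ((q0, netf q0) :: qs.map (fun q => (q, netf q))).foldl pvStep (none, []) := by
          rw [b_loop_eq_foldl evs.length evs (le_refl _), hGdec, hDl, List.map_cons]
        -- the two minima agree
        have hpermv : (netf k0 :: ks.map netf).Perm (netf q0 :: qs.map netf) := by
          have := hpermD.map netf
          rwa [hpl, hDl, List.map_cons, List.map_cons] at this
        have hminA : pvMin (netf k0) (ks.map (fun k => (k, netf k)))
            = (ks.map netf).foldl min (netf k0) := by
          rw [pvMin_eq_foldl_map, List.map_map]
          rfl
        have hminB : pvMin (netf q0) (qs.map (fun q => (q, netf q)))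
            = (qs.map netf).foldl min (netf q0) := by
          rw [pvMin_eq_foldl_map, List.map_map]
          rfl
        have hmineq : pvMin (netf k0) (ks.map (fun k => (k, netf k)))
            = pvMin (netf q0) (qs.map (fun q => (q, netf q))) := by
          rw [hminA, hminB]
          exact minHead_perm _ _ _ _ hpermv
        set m := pvMin (netf q0) (qs.map (fun q => (q, netf q))) with hm
        -- evaluate both programs
        simp only [smallest_negative_balance, smallest_negative_balance_alt]
        rw [hA, hmineq]
        simp only [← hevs, hB, List.foldl_cons]
        have hstep0 : pvStep (none, ([] : List String)) (q0, netf q0) = (some (netf q0), [q0]) := rfl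
        show (if m ≥ 0 then ["Nobody has a negative balance"]
              else PySem.List.sorted
                ((a_balance l).items.foldl
                  (fun ret pb => if pb.2 = m then ret ++ [pb.1] else ret) ([] : List String))
                (fun x => x) false)
            = _
        rw [hstep0, scan_some, ← hm]
        by_cases hge : m ≥ 0
        · simp [hge]
        · simp only [hge, if_false]
          -- A's accumulated list is the filter of the people list
          have hretA : (a_balance l).items.foldl
              (fun ret pb => if pb.2 = m then ret ++ [pb.1] else ret) ([] : List String)
              = (k0 :: ks).filter (fun k => decide (netf k = m)) := by
            have hfa := PySem.List.foldl_append_if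
              (fun pb : String × Int => decide (pb.2 = m)) Prod.fst (a_balance l).items []
            simp only [decide_eq_true_eq] at hfa
            rw [hfa, List.nil_append, hitems, hpl, List.filter_map, List.map_map]
            have : ((fun pb : String × Int => decide (pb.2 = m)) ∘ fun k => (k, netf k))
                = fun k => decide (netf k = m) := rfl
            rw [this]
            have : (Prod.fst ∘ fun k : String => (k, netf k)) = id := rfl
            rw [this, List.map_id]
          -- B's winners list is the filter of D
          have hretB : (if m = netf q0 then [q0] else [])
              ++ ((qs.map (fun q => (q, netf q))).filter (fun pb => decide (pb.2 = m))).map Prod.fst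
              = (q0 :: qs).filter (fun k => decide (netf k = m)) := by
            rw [List.filter_map, List.map_map]
            have h1 : ((fun pb : String × Int => decide (pb.2 = m)) ∘ fun q => (q, netf q))
                = fun k => decide (netf k = m) := rfl
            have h2 : (Prod.fst ∘ fun k : String => (k, netf k)) = id := rfl
            rw [h1, h2, List.map_id, List.filter_cons]
            by_cases hq0 : netf q0 = m
            · simp [hq0]
            · simp [hq0, Ne.symm hq0]
          rw [hretA, hretB]
          -- sorted(filter people) = filter D, because D is the strictly increasing ordering
          have hpermF : ((q0 :: qs).filter (fun k => decide (netf k = m))).Perm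
              ((k0 :: ks).filter (fun k => decide (netf k = m))) := by
            have := (hpermD.filter (fun k => decide (netf k = m))).symm
            rwa [hpl, hDl] at this
          have hpwF : ((q0 :: qs).filter (fun k => decide (netf k = m))).Pairwise (· < ·) := by
            have hq : (q0 :: qs).Pairwise (fun a b : String => a < b) := by
              rw [← hDl]; exact hg1
            exact List.Pairwise.filter _ hq
          exact PySem.List.sorted_eq_of_perm_of_pairwise_lt _ _ (fun x => x) hpermF hpwF
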